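-- pv_equiv track=rewrite | github.com/HendrixMM/pharmaceutical-rag-knowledge-expert | src/pharmaceutical_processor.py | _derive_evidence_level
-- ===== SOURCE A (Python) =====
-- from typing import Any, Iterable
--
-- def _derive_evidence_level(study_types: Iterable[str]) -> str | None:
--     tiers = {
--         "very_high": {"systematic review", "meta-analysis", "meta analysis"},
--         "high": {"randomized controlled trial", "rct", "phase iii", "phase 3"},
--         "moderate": {
--             "phase ii",
--             "phase 2",
--             "observational study",
--             "cohort study",
--             "case-control study",
--             "case-control studies",
--         },
--         "low": {"case report", "preclinical study", "animal study", "in vitro", "in vitro study"},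
--     }
--     normalized = {str(s or "").strip().lower() for s in study_types if s}
--     if not normalized:
--         return None
--     for level in ("very_high", "high", "moderate", "low"):
--         if tiers[level] & normalized:
--             return level
--     return None
-- ===== SOURCE B (Python) =====
-- _LEVELS = ("very_high", "high", "moderate", "low")
--
-- _RANKS = {
--     "systematic review": 0, "meta-analysis": 0, "meta analysis": 0,
--     "randomized controlled trial": 1, "rct": 1, "phase iii": 1, "phase 3": 1,
--     "phase ii": 2, "phase 2": 2, "observational study": 2, "cohort study": 2,
--     "case-control study": 2, "case-control studies": 2,
--     "case report": 3, "preclinical study": 3, "animal study": 3,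
--     "in vitro": 3, "in vitro study": 3,
-- }
--
-- def _derive_evidence_level(study_types):
--     normalized = {str(s or "").strip().lower() for s in study_types if s}
--     best = None
--     for item in normalized:
--         r = _RANKS.get(item)
--         if r is not None and (best is None or r < best):
--             best = r
--     return None if best is None else _LEVELS[best]
-- ===== Notes on version B (the rewrite author's own statement) =====
-- stated objective: simpler
-- what changed: Replaces the four priority-ordered tier-set intersections with a single flat phrase-to-rank dict and one min-rank pass over the normalized items, mapping the minimum rank back to its level name.
import Mathlib
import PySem

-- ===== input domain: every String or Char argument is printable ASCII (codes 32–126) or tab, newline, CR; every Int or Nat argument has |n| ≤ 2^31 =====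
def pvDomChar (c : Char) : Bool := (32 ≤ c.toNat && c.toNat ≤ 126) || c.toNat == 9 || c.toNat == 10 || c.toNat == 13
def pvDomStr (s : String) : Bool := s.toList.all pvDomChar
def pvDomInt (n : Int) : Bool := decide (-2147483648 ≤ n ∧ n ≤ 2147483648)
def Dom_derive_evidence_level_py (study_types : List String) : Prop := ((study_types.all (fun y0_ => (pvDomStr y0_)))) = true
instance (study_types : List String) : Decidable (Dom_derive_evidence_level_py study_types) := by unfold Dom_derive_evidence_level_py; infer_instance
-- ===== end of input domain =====

-- ===== PORT A =====
-- B re-implements A with a flat phrase->rank index and a single min pass instead of four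
-- priority-ordered set intersections; exact same return value (objective: alternative/simpler).
-- Both sources contain the identical normalization comprehension {str(s or "").strip().lower() for s in study_types if s}
-- (for a str s, `s or ""` is s when s is truthy, and falsy s are filtered out), ported once:
def normSet (study_types : List String) : PySem.Set String :=
  PySem.Set.ofList ((study_types.filter (fun s => s ≠ "")).map (fun s => PySem.Str.lower (PySem.Str.strip s)))

def tiersA : PySem.Dict String (PySem.Set String) := PySem.Dict.mk
  [("very_high", PySem.Set.ofList ["systematic review", "meta-analysis", "meta analysis"]),
   ("high", PySem.Set.ofList ["randomized controlled trial", "rct", "phase iii", "phase 3"]),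
   ("moderate", PySem.Set.ofList ["phase ii", "phase 2", "observational study", "cohort study",
                                  "case-control study", "case-control studies"]),
   ("low", PySem.Set.ofList ["case report", "preclinical study", "animal study", "in vitro", "in vitro study"])]

-- the `for level in (...)` loop; tiers[level] is total here (all four keys are present in the
-- literal dict), so getD with an empty-set default is exact
def aLevelLoop (normalized : PySem.Set String) : List String → Option String
  | [] => none
  | level :: rest =>
      if PySem.Set.inter (PySem.Dict.getD tiersA level PySem.Set.empty) normalized ≠ [] then some level
      else aLevelLoop normalized rest

def derive_evidence_level_py (study_types : List String) : Option String :=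
  let normalized := normSet study_types
  if normalized = [] then none
  else aLevelLoop normalized ["very_high", "high", "moderate", "low"]

-- ===== PORT B =====
def levelsB : List String := ["very_high", "high", "moderate", "low"]

def ranksB : PySem.Dict String Int := PySem.Dict.mk
  [("systematic review",0),("meta-analysis",0),("meta analysis",0),
   ("randomized controlled trial",1),("rct",1),("phase iii",1),("phase 3",1),
   ("phase ii",2),("phase 2",2),("observational study",2),("cohort study",2),
   ("case-control study",2),("case-control studies",2),
   ("case report",3),("preclinical study",3),("animal study",3),
   ("in vitro",3),("in vitro study",3)]

-- one iteration of B's `for item in normalized` loop (min is order-independent, so folding the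
-- Set in its list order is exact)
def bStep (best : Option Int) (item : String) : Option Int :=
  match PySem.Dict.get? ranksB item with
  | none => best
  | some r =>
    match best with
    | none => some r
    | some b => if r < b then some r else best

def derive_evidence_level_py_alt (study_types : List String) : Option String :=
  let normalized := normSet study_types
  match normalized.foldl bStep none with
  | none => none
  | some b => some (PySem.List.pyGetD levelsB b "")  -- _LEVELS[best]; best ∈ {0,1,2,3}, always in range

-- ===== PRECONDITION & SPEC =====
def Spec_derive_evidence_level_py (study_types : List String) (out : Option String) : Prop := out = derive_evidence_level_py_alt study_types
instance (study_types : List String) (out : Option String) : Decidable (Spec_derive_evidence_level_py study_types out) := by unfold Spec_derive_evidence_level_py; infer_instance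

-- ===== CLAIM (what is proved, stated in full; the proofs are below) =====
def Claim_equal_derive_evidence_level_py : Prop := ∀ (study_types : List String), Dom_derive_evidence_level_py study_types → Spec_derive_evidence_level_py study_types (derive_evidence_level_py study_types)

-- ===== LEMMAS AND PROOFS =====

def hitB (i : Int) (N : List String) : Bool := N.any (fun s => PySem.Dict.get? ranksB s == some i)

def omin (a b : Option Int) : Option Int :=
  match a, b with
  | none, b => b
  | some x, none => some x
  | some x, some y => if y < x then some y else some x

lemma bStep_eq (best : Option Int) (item : String) :
    bStep best item = omin best (PySem.Dict.get? ranksB item) := by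
  cases hb : best <;> cases hr : PySem.Dict.get? ranksB item <;> simp [bStep, omin, hr]

lemma omin_none_right (a : Option Int) : omin a none = a := by cases a <;> rfl

lemma omin_some_some (x y : Int) : omin (some x) (some y) = some (min x y) := by
  simp only [omin]; split_ifs <;> simp only [Option.some.injEq] <;> omega

lemma omin_none_left (b : Option Int) : omin none b = b := rfl

lemma omin_assoc (a b c : Option Int) : omin (omin a b) c = omin a (omin b c) := by
  cases a <;> cases b <;> cases c <;>
    simp only [omin_none_left, omin_none_right, omin_some_some, min_assoc]

lemma foldl_bStep_shift (N : List String) : ∀ (a : Option Int),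
    N.foldl bStep a = omin a (N.foldl bStep none) := by
  induction N with
  | nil => intro a; simp [omin_none_right]
  | cons s N ih =>
    intro a
    rw [List.foldl_cons, List.foldl_cons, ih (bStep a s), ih (bStep none s), bStep_eq, bStep_eq]
    rw [show ∀ b, omin none b = b from fun b => rfl, omin_assoc]

lemma hitB_cons (i : Int) (s : String) (N : List String) :
    hitB i (s :: N) = ((PySem.Dict.get? ranksB s == some i) || hitB i N) := by simp [hitB]

lemma rnk_cases (s : String) : PySem.Dict.get? ranksB s = none ∨ PySem.Dict.get? ranksB s = some 0 ∨
    PySem.Dict.get? ranksB s = some 1 ∨ PySem.Dict.get? ranksB s = some 2 ∨ PySem.Dict.get? ranksB s = some 3 := by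
  cases h : PySem.Dict.get? ranksB s with
  | none => exact Or.inl rfl
  | some v =>
    have hm := PySem.Dict.mem_items_of_get?_eq_some _ h
    simp [ranksB] at hm
    rcases hm with ⟨_,hv⟩|⟨_,hv⟩|⟨_,hv⟩|⟨_,hv⟩|⟨_,hv⟩|⟨_,hv⟩|⟨_,hv⟩|⟨_,hv⟩|⟨_,hv⟩|⟨_,hv⟩|⟨_,hv⟩|⟨_,hv⟩|⟨_,hv⟩|⟨_,hv⟩|⟨_,hv⟩|⟨_,hv⟩|⟨_,hv⟩|⟨_,hv⟩ <;> subst hv <;> simp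

lemma foldl_bStep_chain (N : List String) :
    N.foldl bStep none =
      (if hitB 0 N then some 0 else if hitB 1 N then some 1 else
       if hitB 2 N then some 2 else if hitB 3 N then some 3 else none) := by
  induction N with
  | nil => simp [hitB]
  | cons s N ih =>
    rw [List.foldl_cons, foldl_bStep_shift, ih, bStep_eq,
        show ∀ b, omin none b = b from fun b => rfl]
    clear ih
    rcases rnk_cases s with h | h | h | h | h <;>
      simp only [hitB_cons, h] <;>
      by_cases h0 : hitB 0 N <;> by_cases h1 : hitB 1 N <;>
      by_cases h2 : hitB 2 N <;> by_cases h3 : hitB 3 N <;>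
      simp [omin, h0, h1, h2, h3]



lemma rnk_zero_iff (s : String) : PySem.Dict.get? ranksB s = some 0 ↔
    ((s = "systematic review") ∨ (s = "meta-analysis") ∨ (s = "meta analysis")) := by
  constructor
  · intro h
    have hm := PySem.Dict.mem_items_of_get?_eq_some _ h
    simp [ranksB] at hm
    tauto
  · rintro (rfl | rfl | rfl) <;> rfl

lemma hit_zero_iff (N : List String) : hitB 0 N = true ↔
    (("systematic review" ∈ N) ∨ ("meta-analysis" ∈ N) ∨ ("meta analysis" ∈ N)) := by
  simp only [hitB, List.any_eq_true, beq_iff_eq, rnk_zero_iff]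
  constructor
  · rintro ⟨s, hs, rfl | rfl | rfl⟩ <;> tauto
  · rintro (h | h | h) <;> exact ⟨_, h, by tauto⟩

-- A's truthiness test `tiers[level] & normalized` for level "very_high", as hitB
lemma interA_zero (N : List String) :
    (PySem.Set.inter (PySem.Dict.getD tiersA "very_high" PySem.Set.empty) N ≠ []) ↔ hitB 0 N = true := by
  rw [show PySem.Dict.getD tiersA "very_high" PySem.Set.empty =
        ["systematic review", "meta-analysis", "meta analysis"] from rfl,
      hit_zero_iff, Ne, PySem.Set.inter, List.filter_eq_nil_iff]
  push Not
  simp [PySem.Set.contains]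

lemma rnk_one_iff (s : String) : PySem.Dict.get? ranksB s = some 1 ↔
    ((s = "randomized controlled trial") ∨ (s = "rct") ∨ (s = "phase iii") ∨ (s = "phase 3")) := by
  constructor
  · intro h
    have hm := PySem.Dict.mem_items_of_get?_eq_some _ h
    simp [ranksB] at hm
    tauto
  · rintro (rfl | rfl | rfl | rfl) <;> rfl

lemma hit_one_iff (N : List String) : hitB 1 N = true ↔
    (("randomized controlled trial" ∈ N) ∨ ("rct" ∈ N) ∨ ("phase iii" ∈ N) ∨ ("phase 3" ∈ N)) := by
  simp only [hitB, List.any_eq_true, beq_iff_eq, rnk_one_iff]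
  constructor
  · rintro ⟨s, hs, rfl | rfl | rfl | rfl⟩ <;> tauto
  · rintro (h | h | h | h) <;> exact ⟨_, h, by tauto⟩

-- A's truthiness test `tiers[level] & normalized` for level "high", as hitB
lemma interA_one (N : List String) :
    (PySem.Set.inter (PySem.Dict.getD tiersA "high" PySem.Set.empty) N ≠ []) ↔ hitB 1 N = true := by
  rw [show PySem.Dict.getD tiersA "high" PySem.Set.empty =
        ["randomized controlled trial", "rct", "phase iii", "phase 3"] from rfl,
      hit_one_iff, Ne, PySem.Set.inter, List.filter_eq_nil_iff]
  push Not
  simp [PySem.Set.contains]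

lemma rnk_two_iff (s : String) : PySem.Dict.get? ranksB s = some 2 ↔
    ((s = "phase ii") ∨ (s = "phase 2") ∨ (s = "observational study") ∨ (s = "cohort study") ∨ (s = "case-control study") ∨ (s = "case-control studies")) := by
  constructor
  · intro h
    have hm := PySem.Dict.mem_items_of_get?_eq_some _ h
    simp [ranksB] at hm
    tauto
  · rintro (rfl | rfl | rfl | rfl | rfl | rfl) <;> rfl

lemma hit_two_iff (N : List String) : hitB 2 N = true ↔
    (("phase ii" ∈ N) ∨ ("phase 2" ∈ N) ∨ ("observational study" ∈ N) ∨ ("cohort study" ∈ N) ∨ ("case-control study" ∈ N) ∨ ("case-control studies" ∈ N)) := by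
  simp only [hitB, List.any_eq_true, beq_iff_eq, rnk_two_iff]
  constructor
  · rintro ⟨s, hs, rfl | rfl | rfl | rfl | rfl | rfl⟩ <;> tauto
  · rintro (h | h | h | h | h | h) <;> exact ⟨_, h, by tauto⟩

-- A's truthiness test `tiers[level] & normalized` for level "moderate", as hitB
lemma interA_two (N : List String) :
    (PySem.Set.inter (PySem.Dict.getD tiersA "moderate" PySem.Set.empty) N ≠ []) ↔ hitB 2 N = true := by
  rw [show PySem.Dict.getD tiersA "moderate" PySem.Set.empty =
        ["phase ii", "phase 2", "observational study", "cohort study", "case-control study", "case-control studies"] from rfl,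
      hit_two_iff, Ne, PySem.Set.inter, List.filter_eq_nil_iff]
  push Not
  simp [PySem.Set.contains]

lemma rnk_three_iff (s : String) : PySem.Dict.get? ranksB s = some 3 ↔
    ((s = "case report") ∨ (s = "preclinical study") ∨ (s = "animal study") ∨ (s = "in vitro") ∨ (s = "in vitro study")) := by
  constructor
  · intro h
    have hm := PySem.Dict.mem_items_of_get?_eq_some _ h
    simp [ranksB] at hm
    tauto
  · rintro (rfl | rfl | rfl | rfl | rfl) <;> rfl

lemma hit_three_iff (N : List String) : hitB 3 N = true ↔
    (("case report" ∈ N) ∨ ("preclinical study" ∈ N) ∨ ("animal study" ∈ N) ∨ ("in vitro" ∈ N) ∨ ("in vitro study" ∈ N)) := by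
  simp only [hitB, List.any_eq_true, beq_iff_eq, rnk_three_iff]
  constructor
  · rintro ⟨s, hs, rfl | rfl | rfl | rfl | rfl⟩ <;> tauto
  · rintro (h | h | h | h | h) <;> exact ⟨_, h, by tauto⟩

-- A's truthiness test `tiers[level] & normalized` for level "low", as hitB
lemma interA_three (N : List String) :
    (PySem.Set.inter (PySem.Dict.getD tiersA "low" PySem.Set.empty) N ≠ []) ↔ hitB 3 N = true := by
  rw [show PySem.Dict.getD tiersA "low" PySem.Set.empty =
        ["case report", "preclinical study", "animal study", "in vitro", "in vitro study"] from rfl,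
      hit_three_iff, Ne, PySem.Set.inter, List.filter_eq_nil_iff]
  push Not
  simp [PySem.Set.contains]

lemma interA_zero_eq (N : List String) :
    (PySem.Set.inter (PySem.Dict.getD tiersA "very_high" ([] : PySem.Set String)) N = []) ↔ ¬ hitB 0 N = true := by
  rw [← interA_zero N]
  exact not_not.symm

lemma interA_one_eq (N : List String) :
    (PySem.Set.inter (PySem.Dict.getD tiersA "high" ([] : PySem.Set String)) N = []) ↔ ¬ hitB 1 N = true := by
  rw [← interA_one N]
  exact not_not.symm

lemma interA_two_eq (N : List String) :
    (PySem.Set.inter (PySem.Dict.getD tiersA "moderate" ([] : PySem.Set String)) N = []) ↔ ¬ hitB 2 N = true := by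
  rw [← interA_two N]
  exact not_not.symm

lemma interA_three_eq (N : List String) :
    (PySem.Set.inter (PySem.Dict.getD tiersA "low" ([] : PySem.Set String)) N = []) ↔ ¬ hitB 3 N = true := by
  rw [← interA_three N]
  exact not_not.symm

-- ===== VERDICT (by name: the statement is the Claim_ definition above) =====
theorem derive_evidence_level_py_spec : Claim_equal_derive_evidence_level_py := by
  intro study_types _
  simp only [Spec_derive_evidence_level_py, derive_evidence_level_py, derive_evidence_level_py_alt]
  set N := normSet study_types with hN
  clear_value N
  rw [foldl_bStep_chain]
  by_cases hE : N = []
  · rw [if_pos hE, hE]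
    simp [hitB]
  · rw [if_neg hE]
    simp only [aLevelLoop]
    by_cases h0 : hitB 0 N = true <;> by_cases h1 : hitB 1 N = true <;>
    by_cases h2 : hitB 2 N = true <;> by_cases h3 : hitB 3 N = true <;>
      simp [interA_zero_eq, interA_one_eq, interA_two_eq, interA_three_eq, h0, h1, h2, h3,
            show PySem.List.pyGetD levelsB 0 "" = "very_high" from rfl,
            show PySem.List.pyGetD levelsB 1 "" = "high" from rfl,
            show PySem.List.pyGetD levelsB 2 "" = "moderate" from rfl,
            show PySem.List.pyGetD levelsB 3 "" = "low" from rfl]
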